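-- pv_equiv track=rewrite | github.com/15025639392/xiao_yan | services/core/app/api/chat_skills.py | _parse_skill_frontmatter
-- ===== SOURCE A (Python) =====
-- def _parse_skill_frontmatter(skill_content: str) -> tuple[str | None, str | None]:
--     lines = skill_content.splitlines()
--     if len(lines) < 3 or lines[0].strip() != "---":
--         return None, None
--
--     end_index: int | None = None
--     for index in range(1, len(lines)):
--         if lines[index].strip() == "---":
--             end_index = index
--             break
--     if end_index is None:
--         return None, None
--
--     name: str | None = None
--     description: str | None = None
--     for line in lines[1:end_index]:
--         if ":" not in line:
--             continue
--         key, value = line.split(":", 1)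
--         normalized_key = key.strip().lower()
--         normalized_value = value.strip().strip('"').strip("'")
--         if normalized_key == "name" and normalized_value:
--             name = normalized_value
--         elif normalized_key == "description" and normalized_value:
--             description = normalized_value
--     return name, description
-- ===== SOURCE B (Python) =====
-- def _parse_skill_frontmatter(skill_content: str) -> tuple:
--     lines = skill_content.splitlines()
--     if len(lines) < 3 or lines[0].strip() != "---":
--         return None, None
--     end = 1
--     while end < len(lines) and lines[end].strip() != "---":
--         end += 1
--     if end == len(lines):
--         return None, None
--     return (_last_field(lines, end - 1, "name"),
--             _last_field(lines, end - 1, "description"))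
--
--
-- def _last_field(lines, i, key):
--     # scan the frontmatter body backwards: the first hit from the back is the
--     # last (winning) assignment of the key
--     while i >= 1:
--         line = lines[i]
--         if ":" in line:
--             head, value = line.split(":", 1)
--             if head.strip().lower() == key:
--                 v = value.strip().strip('"').strip("'")
--                 if v:
--                     return v
--         i -= 1
--     return None
-- ===== Notes on version B (the rewrite author's own statement) =====
-- stated objective: alternative
-- what changed: Replaces A's single forward accumulator pass (last assignment wins via overwriting two variables) by two independent backward searches from the closing delimiter, one per field, each returning the first match seen from the back with early exit; the closing delimiter is found by a while loop instead of a for/break.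
import Mathlib
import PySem

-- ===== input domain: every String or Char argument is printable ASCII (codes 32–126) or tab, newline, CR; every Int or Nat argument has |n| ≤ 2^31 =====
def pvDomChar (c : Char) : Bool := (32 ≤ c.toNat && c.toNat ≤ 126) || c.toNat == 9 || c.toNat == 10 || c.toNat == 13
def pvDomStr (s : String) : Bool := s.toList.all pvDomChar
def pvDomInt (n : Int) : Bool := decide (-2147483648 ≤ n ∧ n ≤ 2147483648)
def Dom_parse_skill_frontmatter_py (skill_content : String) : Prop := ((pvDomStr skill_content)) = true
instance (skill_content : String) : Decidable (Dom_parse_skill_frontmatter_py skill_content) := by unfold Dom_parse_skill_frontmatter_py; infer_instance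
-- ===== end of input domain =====

-- B replaces A's forward last-wins accumulator pass by two independent backward searches
-- (one per field, first hit from the back wins, early exit); same return value, no speed claim.

-- value.strip().strip('"').strip("'")  (shared subexpression of both Pythons)
def pvStripVal (v : String) : String :=
  PySem.Str.stripChars (PySem.Str.stripChars (PySem.Str.strip v) "\"") "'"

-- ===== PORT A =====
-- the 'for index in range(1, len(lines)): … break' loop (pyGet? .getD "" — the index is always in range)
def pvFindEnd (lines : List String) : List Int → Option Int
  | [] => none
  | i :: rest =>
    if PySem.Str.strip ((PySem.List.pyGet? lines i).getD "") == "---" then some i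
    else pvFindEnd lines rest

-- body of A's second for-loop
def pvLineA (st : Option String × Option String) (line : String) : Option String × Option String :=
  if PySem.Str.isIn ":" line then
    match PySem.Str.splitMax? line ":" 1 with
    | some [k, v] =>
      let nk := PySem.Str.lower (PySem.Str.strip k)
      let nv := pvStripVal v
      if nk == "name" && nv != "" then (some nv, st.2)
      else if nk == "description" && nv != "" then (st.1, some nv)
      else st
    | _ => st   -- unreachable in Python: split(':',1) with ':' in line yields exactly two parts
  else st

def parse_skill_frontmatter_py (skill_content : String) : Option String × Option String :=
  let lines := PySem.Str.splitlines skill_content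
  if lines.length < 3 then (none, none)
  else if ¬ (PySem.Str.strip (lines.headD "") == "---") then (none, none)
  else
    match pvFindEnd lines (PySem.List.pyRange 1 lines.length 1) with
    | none => (none, none)
    | some e => (PySem.List.slice lines (some 1) (some e)).foldl pvLineA (none, none)

-- ===== PORT B =====
-- 'while end < len(lines) and lines[end].strip() != "---": end += 1'
def pvWhileEnd (lines : List String) (e : Nat) : Nat :=
  if h : e < lines.length then
    if PySem.Str.strip ((PySem.List.pyGet? lines (e : Int)).getD "") == "---" then e
    else pvWhileEnd lines (e + 1)
  else e
termination_by lines.length - e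

-- '_last_field(lines, i, key)': backward scan i, i-1, …, 1
def pvLastField (lines : List String) (key : String) : Nat → Option String
  | 0 => none
  | Nat.succ j =>
    let line := (PySem.List.pyGet? lines ((j + 1 : Nat) : Int)).getD ""
    if PySem.Str.isIn ":" line then
      match PySem.Str.splitMax? line ":" 1 with
      | some [k, v] =>
        if PySem.Str.lower (PySem.Str.strip k) == key then
          let nv := pvStripVal v
          if nv != "" then some nv else pvLastField lines key j
        else pvLastField lines key j
      | _ => pvLastField lines key j   -- unreachable in Python (split(':',1) with ':' present)
    else pvLastField lines key j

def parse_skill_frontmatter_py_alt (skill_content : String) : Option String × Option String :=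
  let lines := PySem.Str.splitlines skill_content
  if lines.length < 3 then (none, none)
  else if ¬ (PySem.Str.strip (lines.headD "") == "---") then (none, none)
  else
    let e := pvWhileEnd lines 1
    if e == lines.length then (none, none)
    else (pvLastField lines "name" (e - 1), pvLastField lines "description" (e - 1))

-- ===== PRECONDITION & SPEC =====
def Spec_parse_skill_frontmatter_py (skill_content : String) (out : Option String × Option String) : Prop := out = parse_skill_frontmatter_py_alt skill_content
instance (skill_content : String) (out : Option String × Option String) : Decidable (Spec_parse_skill_frontmatter_py skill_content out) := by unfold Spec_parse_skill_frontmatter_py; infer_instance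

-- ===== CLAIM =====
def Claim_equal_parse_skill_frontmatter_py : Prop := ∀ (skill_content : String), Dom_parse_skill_frontmatter_py skill_content → Spec_parse_skill_frontmatter_py skill_content (parse_skill_frontmatter_py skill_content)

-- ===== LEMMAS AND PROOFS =====

-- the value a line contributes to a given key (shared characterization of both per-line bodies)
def pvLineVal (key line : String) : Option String :=
  if PySem.Str.isIn ":" line then
    match PySem.Str.splitMax? line ":" 1 with
    | some [k, v] =>
      if PySem.Str.lower (PySem.Str.strip k) == key && pvStripVal v != "" then some (pvStripVal v)
      else none
    | _ => none
  else none

lemma lineA_eq (st : Option String × Option String) (line : String) :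
    pvLineA st line =
      ((pvLineVal "name" line).or st.1, (pvLineVal "description" line).or st.2) := by
  unfold pvLineA pvLineVal
  by_cases hin : PySem.Str.isIn ":" line = true
  · simp only [hin, if_true]
    rcases hsp : PySem.Str.splitMax? line ":" 1 with _ | parts
    · simp
    · match parts with
      | [] => simp
      | [k] => simp
      | k :: v :: w :: t => simp
      | [k, v] =>
        by_cases hnv : pvStripVal v = ""
        · simp [hnv]
        · by_cases hk : PySem.Str.lower (PySem.Str.strip k) = "name"
          · simp [hk, hnv]
          · by_cases hk2 : PySem.Str.lower (PySem.Str.strip k) = "description"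
            · simp [hk, hk2, hnv]
            · simp [hk, hk2, hnv]
  · have hin' : PySem.Str.isIn ":" line = false := by simpa using hin
    simp only [hin', Bool.false_eq_true, if_false]
    simp

lemma foldl_lineA (l : List String) : ∀ (st : Option String × Option String),
    l.foldl pvLineA st =
      ((l.reverse.findSome? (pvLineVal "name")).or st.1,
       (l.reverse.findSome? (pvLineVal "description")).or st.2) := by
  induction l with
  | nil => intro st; simp
  | cons a l ih =>
    intro st
    rw [List.foldl_cons, ih, lineA_eq]
    simp [List.findSome?_append, Option.or_assoc]

-- one backward step of _last_field is the line's contribution followed by the rest of the scan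
lemma lastField_succ (lines : List String) (key : String) (j : Nat) :
    pvLastField lines key (j + 1) =
      (pvLineVal key ((PySem.List.pyGet? lines ((j + 1 : Nat) : Int)).getD "")).or
        (pvLastField lines key j) := by
  rw [pvLastField]
  set line := (PySem.List.pyGet? lines ((j + 1 : Nat) : Int)).getD "" with hline
  unfold pvLineVal
  by_cases hin : PySem.Str.isIn ":" line = true
  · simp only [hin, if_true]
    rcases hsp : PySem.Str.splitMax? line ":" 1 with _ | parts
    · simp
    · match parts with
      | [] => simp
      | [k] => simp
      | k :: v :: w :: t => simp
      | [k, v] =>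
        by_cases hk : PySem.Str.lower (PySem.Str.strip k) = key
        · by_cases hnv : pvStripVal v = ""
          · simp [hk, hnv]
          · simp [hk, hnv]
        · simp [hk]
  · have hin' : PySem.Str.isIn ":" line = false := by simpa using hin
    simp only [hin', Bool.false_eq_true, if_false]
    simp

lemma lastField_eq (lines : List String) (key : String) : ∀ (i : Nat), i < lines.length →
    pvLastField lines key i = (((lines.drop 1).take i).reverse.findSome? (pvLineVal key)) := by
  intro i
  induction i with
  | zero => intro _; simp [pvLastField]
  | succ j ih =>
    intro hlt
    have hj1 : j + 1 < lines.length := hlt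
    have hget : (PySem.List.pyGet? lines ((j + 1 : Nat) : Int)).getD "" = lines[j + 1] := by
      rw [PySem.List.pyGet?_natCast]
      simp [hj1]
    have htake : (lines.drop 1).take (j + 1) = (lines.drop 1).take j ++ [lines[j + 1]] := by
      rw [List.take_add_one]
      have hjd : j < (lines.drop 1).length := by simp; omega
      simp [hjd, List.getElem_drop]
    rw [lastField_succ, hget, ih (by omega), htake, List.reverse_append]
    simp only [List.reverse_singleton, List.singleton_append, List.findSome?_cons]
    cases hv : pvLineVal key lines[j + 1] <;> simp [hv]

lemma findEnd_whileEnd (lines : List String) : ∀ (n j : Nat), j ≤ lines.length → lines.length - j = n →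
    pvFindEnd lines (PySem.List.pyRange (j : Int) (lines.length : Int) 1) =
      (if pvWhileEnd lines j = lines.length then none else some ((pvWhileEnd lines j : Nat) : Int)) ∧
    (pvWhileEnd lines j ≠ lines.length → j ≤ pvWhileEnd lines j ∧ pvWhileEnd lines j < lines.length) := by
  intro n
  induction n with
  | zero =>
    intro j hj hn
    have hje : j = lines.length := by omega
    subst hje
    rw [PySem.List.pyRange_one_eq_nil le_rfl]
    rw [pvWhileEnd]
    simp [pvFindEnd]
  | succ m ih =>
    intro j hj hn
    have hjlt : j < lines.length := by omega
    rw [PySem.List.pyRange_one_cons (by exact_mod_cast hjlt), pvFindEnd, pvWhileEnd, dif_pos hjlt]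
    by_cases hs : (PySem.Str.strip ((PySem.List.pyGet? lines (j : Int)).getD "") == "---") = true
    · rw [if_pos hs, if_pos hs, if_neg (by omega)]
      exact ⟨rfl, fun _ => ⟨le_rfl, hjlt⟩⟩
    · rw [if_neg hs, if_neg hs]
      have hcast : ((j : Int) + 1) = ((j + 1 : Nat) : Int) := by push_cast; ring
      rw [hcast]
      obtain ⟨h1, h2⟩ := ih (j + 1) (by omega) (by omega)
      exact ⟨h1, fun hne => ⟨by have := (h2 hne).1; omega, (h2 hne).2⟩⟩

-- ===== VERDICT =====
theorem parse_skill_frontmatter_py_spec : Claim_equal_parse_skill_frontmatter_py := by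
  intro s _
  unfold Spec_parse_skill_frontmatter_py parse_skill_frontmatter_py parse_skill_frontmatter_py_alt
  set lines := PySem.Str.splitlines s with hl
  clear_value lines
  by_cases h3 : lines.length < 3
  · simp [h3]
  · simp only [h3, if_false]
    by_cases hh : (PySem.Str.strip (lines.headD "") == "---") = true
    · rw [if_neg (by simpa using hh), if_neg (by simpa using hh)]
      have h1 : (1 : Nat) ≤ lines.length := by omega
      obtain ⟨heq, hrange⟩ := findEnd_whileEnd lines (lines.length - 1) 1 h1 rfl
      norm_num at heq
      rw [heq]
      by_cases hend : pvWhileEnd lines 1 = lines.length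
      · rw [if_pos hend]
        simp [hend]
      · rw [if_neg hend, if_neg (by simpa using hend)]
        obtain ⟨hge, hlt⟩ := hrange hend
        set e := pvWhileEnd lines 1 with he
        show (PySem.List.slice lines (some 1) (some (e : Int))).foldl pvLineA (none, none) =
          (pvLastField lines "name" (e - 1), pvLastField lines "description" (e - 1))
        have hslice : PySem.List.slice lines (some 1) (some (e : Int)) = (lines.drop 1).take (e - 1) := by
          have h := PySem.List.slice_natCast lines 1 e
          simpa using h
        rw [hslice, foldl_lineA,
          lastField_eq lines "name" (e - 1) (by omega), lastField_eq lines "description" (e - 1) (by omega)]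
        simp
    · rw [if_pos hh, if_pos hh]
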